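-- pv_equiv track=rewrite | github.com/jakubpulaczewski/codewars | 7-kyu/least-larger.py | least_larger
-- ===== SOURCE A (Python) =====
-- def least_larger(a, i):
--     if a[i] == max(a):
--         return -1
--     else:
--         target = a[i]
--         new_a = sorted(a)
--         for i,num in enumerate(new_a):
--             if num == target:
--                 if new_a[i+1] > target:
--                     return a.index(new_a[i+1])
-- ===== SOURCE B (Python) =====
-- def least_larger(a, i):
--     target = a[i]
--     best = None
--     for x in a:
--         if x > target and (best is None or x < best):
--             best = x
--     if best is None:
--         return -1
--     return a.index(best)
-- ===== Notes on version B (the rewrite author's own statement) =====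
-- stated objective: alternative
-- what changed: replaces sort-then-scan (sorted copy, enumerate walk with lookahead, index lookup) by a single linear pass that keeps the minimum element greater than a[i], then one a.index call; O(n) instead of O(n log n), measured speedup varies with the input family
import Mathlib
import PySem

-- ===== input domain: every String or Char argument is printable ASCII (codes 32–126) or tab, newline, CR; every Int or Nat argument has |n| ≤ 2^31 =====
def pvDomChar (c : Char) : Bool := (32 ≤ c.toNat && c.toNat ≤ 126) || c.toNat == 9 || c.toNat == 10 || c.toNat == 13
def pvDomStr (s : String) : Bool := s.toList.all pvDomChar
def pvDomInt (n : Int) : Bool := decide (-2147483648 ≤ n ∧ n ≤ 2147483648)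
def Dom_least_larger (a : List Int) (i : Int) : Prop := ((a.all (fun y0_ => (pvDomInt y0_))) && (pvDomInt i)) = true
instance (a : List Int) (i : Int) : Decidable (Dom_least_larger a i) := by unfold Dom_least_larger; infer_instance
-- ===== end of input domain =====

-- B replaces A's sort-then-scan by one linear pass keeping the least element above a[i]; equivalence of return values on valid indices.

-- ===== PORT A =====
-- the 'for i,num in enumerate(new_a)' loop; the 'none' in the inner match is Python's
-- IndexError on new_a[i+1] (unreachable when a[i] is not the maximum)
def llLoop (a newa : List Int) (target : Int) : List (Int × Int) → Option Int
  | [] => none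
  | (j, num) :: rest =>
    if num = target then
      match PySem.List.pyGet? newa (j + 1) with
      | none => none
      | some nxt =>
        if target < nxt then (PySem.List.index? a nxt).map (fun n => (n : Int))
        else llLoop a newa target rest
    else llLoop a newa target rest

def least_larger (a : List Int) (i : Int) : Option Int :=
  match PySem.List.pyGet? a i, PySem.List.max? a (fun x => x) with
  | some ai, some m =>
    if ai = m then some (-1)
    else
      let newa := PySem.List.sorted a (fun x => x) false
      llLoop a newa ai (PySem.List.enumerate newa 0)
  | _, _ => none

-- ===== PORT B =====
-- 'if x > target and (best is None or x < best): best = x'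
def bStep (target : Int) (best : Option Int) (x : Int) : Option Int :=
  if target < x then
    match best with
    | none => some x
    | some b => if x < b then some x else best
  else best

def least_larger_alt (a : List Int) (i : Int) : Option Int :=
  match PySem.List.pyGet? a i with
  | none => none
  | some target =>
    match a.foldl (bStep target) none with
    | none => some (-1)
    | some b => (PySem.List.index? a b).map (fun n => (n : Int))

-- ===== PRECONDITION & SPEC =====
-- Pre_: i must be a valid (possibly negative) index into a, exactly where Python's a[i] returns
def Pre_least_larger (a : List Int) (i : Int) : Prop := PySem.Raise.InRange a.length i
instance (a : List Int) (i : Int) : Decidable (Pre_least_larger a i) := by unfold Pre_least_larger; infer_instance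
def pvWitness_least_larger : List Int × Int := ([3, 1, 2], 1)

def Spec_least_larger (a : List Int) (i : Int) (out : Option Int) : Prop := out = least_larger_alt a i
instance (a : List Int) (i : Int) (out : Option Int) : Decidable (Spec_least_larger a i out) := by unfold Spec_least_larger; infer_instance

-- ===== CLAIM (what is proved, stated in full; the proofs are below) =====
def Claim_equal_least_larger : Prop := ∀ (a : List Int) (i : Int), Dom_least_larger a i → Pre_least_larger a i → Spec_least_larger a i (least_larger a i)

-- ===== LEMMAS AND PROOFS =====

theorem bStep_none_of_not_gt {t : Int} (l : List Int) (h : ∀ x ∈ l, ¬ t < x) (acc : Option Int) :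
    l.foldl (bStep t) acc = acc := by
  induction l generalizing acc with
  | nil => rfl
  | cons x l ih =>
    have hx : ¬ t < x := h x (by simp)
    simp only [List.foldl_cons, bStep, if_neg hx]
    exact ih (fun y hy => h y (by simp [hy])) acc

theorem bStep_isSome {t : Int} (l : List Int) (acc : Option Int)
    (h : acc.isSome ∨ ∃ x ∈ l, t < x) : (l.foldl (bStep t) acc).isSome := by
  induction l generalizing acc with
  | nil =>
    rcases h with h | ⟨x, hx, _⟩
    · exact h
    · simp at hx
  | cons x l ih =>
    simp only [List.foldl_cons]
    apply ih
    by_cases hx : t < x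
    · left
      cases acc with
      | none => simp [bStep, hx]
      | some b => simp only [bStep, if_pos hx]; split <;> simp
    · rcases h with h | ⟨y, hy, hty⟩
      · left; cases acc with
        | none => simp at h
        | some b => simp [bStep, hx]
      · rcases List.mem_cons.1 hy with rfl | hy'
        · exact absurd hty hx
        · right; exact ⟨y, hy', hty⟩

theorem bStep_min {t : Int} (l : List Int) :
    ∀ (acc : Option Int), (∀ b, acc = some b → t < b) →
    ∀ m, l.foldl (bStep t) acc = some m →
      t < m ∧ (m ∈ l ∨ acc = some m) ∧ (∀ x ∈ l, t < x → m ≤ x) ∧ (∀ b, acc = some b → m ≤ b) := by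
  induction l with
  | nil =>
    intro acc hacc m hm
    simp only [List.foldl_nil] at hm
    exact ⟨hacc m hm, Or.inr hm, by simp, fun b hb => le_of_eq (by rw [hm] at hb; exact Option.some.inj hb)⟩
  | cons x l ih =>
    intro acc hacc m hm
    simp only [List.foldl_cons] at hm
    have hacc' : ∀ b, bStep t acc x = some b → t < b := by
      intro b hb
      by_cases hx : t < x
      · cases acc with
        | none => simp [bStep, hx] at hb; omega
        | some c =>
          simp only [bStep, if_pos hx] at hb
          split at hb
          · simp at hb; omega
          · exact hacc b hb
      · simp only [bStep, if_neg hx] at hb; exact hacc b hb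
    obtain ⟨h1, h2, h3, h4⟩ := ih (bStep t acc x) hacc' m hm
    refine ⟨h1, ?_, ?_, ?_⟩
    · rcases h2 with h2 | h2
      · exact Or.inl (by simp [h2])
      · by_cases hx : t < x
        · cases acc with
          | none => simp [bStep, hx] at h2; exact Or.inl (by simp [h2])
          | some c =>
            simp only [bStep, if_pos hx] at h2
            split at h2
            · simp at h2; exact Or.inl (by simp [h2])
            · exact Or.inr h2
        · simp only [bStep, if_neg hx] at h2; exact Or.inr h2
    · intro y hy hty
      rcases List.mem_cons.1 hy with rfl | hy'
      · -- m ≤ head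
        cases acc with
        | none => have := h4 y (by simp [bStep, hty]); omega
        | some c =>
          simp only [bStep, if_pos hty] at h4
          by_cases hyc : y < c
          · have := h4 y (by simp [hyc]); omega
          · have := h4 c (by simp [hyc]); omega
      · exact h3 y hy' hty
    · intro b hb
      by_cases hx : t < x
      · simp only [hb, bStep, if_pos hx] at h4
        by_cases hxb : x < b
        · have h5 := h4 x (by simp [hxb]); omega
        · exact h4 b (by simp [hxb])
      · exact h4 b (by simp [bStep, if_neg hx, hb])

-- A's loop over the sorted list returns the index of the least element above t
theorem llLoop_go (a newa : List Int) (t : Int) :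
    ∀ (l : List Int) (k : Nat), newa.drop k = l → l.Pairwise (· ≤ ·) → t ∈ l →
    ∀ m, m ∈ l → t < m → (∀ x ∈ l, t < x → m ≤ x) →
    llLoop a newa t (PySem.List.enumerate l (k : Int)) =
      (PySem.List.index? a m).map (fun n => (n : Int)) := by
  intro l
  induction l with
  | nil => intro k _ _ ht; simp at ht
  | cons h rest ih =>
    intro k hdrop hpw ht m hm htm hmin
    have hdrop' : newa.drop (k + 1) = rest := by
      rw [← List.drop_drop (i := 1) (j := k), hdrop]; rfl
    rw [PySem.List.enumerate_cons]
    by_cases hh : h = t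
    · -- num == target
      have hm' : m ∈ rest := by
        rcases List.mem_cons.1 hm with rfl | h' <;> [omega; exact h']
      obtain ⟨r, rs, rfl⟩ : ∃ r rs, rest = r :: rs := by
        cases rest with
        | nil => simp at hm'
        | cons r rs => exact ⟨r, rs, rfl⟩
      have hget : PySem.List.pyGet? newa ((k : Int) + 1) = some r := by
        have : ((k : Int) + 1) = ((k + 1 : Nat) : Int) := by push_cast; ring
        rw [this, PySem.List.pyGet?_natCast]
        have : newa[k + 1]? = (newa.drop (k + 1))[0]? := by
          rw [List.getElem?_drop]
        rw [this, hdrop']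
        rfl
      have hhr : h ≤ r := (List.pairwise_cons.1 hpw).1 r (by simp)
      simp only [llLoop, if_pos hh, hget]
      by_cases htr : t < r
      · rw [if_pos htr]
        have hrm : r = m := by
          have h1 : m ≤ r := hmin r (by simp) htr
          have h2 : r ≤ m := by
            rcases List.mem_cons.1 hm' with rfl | hmr
            · omega
            · exact (List.pairwise_cons.1 (List.pairwise_cons.1 hpw).2).1 m hmr
          omega
        rw [hrm]
      · rw [if_neg htr]
        have hrt : r = t := by omega
        have hcast : ((k : Int) + 1) = ((k + 1 : Nat) : Int) := by push_cast; ring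
        rw [hcast]
        exact ih (k + 1) hdrop' (List.pairwise_cons.1 hpw).2 (by simp [hrt]) m hm' htm
          (fun x hx hx' => hmin x (by simp [hx]) hx')
    · -- num != target
      simp only [llLoop, if_neg hh]
      have hht : h ≤ t := (List.pairwise_cons.1 hpw).1 t (by
        rcases List.mem_cons.1 ht with rfl | h' <;> [exact absurd rfl hh; exact h'])
      have hm' : m ∈ rest := by
        rcases List.mem_cons.1 hm with rfl | h' <;> [omega; exact h']
      have ht' : t ∈ rest := by
        rcases List.mem_cons.1 ht with rfl | h' <;> [exact absurd rfl hh; exact h']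
      have hcast : ((k : Int) + 1) = ((k + 1 : Nat) : Int) := by push_cast; ring
      rw [hcast]
      exact ih (k + 1) hdrop' (List.pairwise_cons.1 hpw).2 ht' m hm' htm
        (fun x hx hx' => hmin x (by simp [hx]) hx')

-- ===== VERDICT (by name: the statement is the Claim_ definition above) =====
theorem least_larger_spec : Claim_equal_least_larger := by
  intro a i _ hpre
  unfold Spec_least_larger least_larger least_larger_alt
  obtain ⟨t, hget⟩ : ∃ t, PySem.List.pyGet? a i = some t := by
    cases hg : PySem.List.pyGet? a i with
    | none => exact absurd hpre ((PySem.List.pyGet?_eq_none_iff a i).1 hg)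
    | some t => exact ⟨t, rfl⟩
  have hta : t ∈ a := PySem.List.mem_of_pyGet?_eq_some a hget
  obtain ⟨M, hmax⟩ : ∃ M, PySem.List.max? a (fun x => x) = some M := by
    cases hm : PySem.List.max? a (fun x => x) with
    | none =>
      have : a = [] := (PySem.List.max?_eq_none_iff a (fun x => x)).1 hm
      subst this; simp at hta
    | some M => exact ⟨M, rfl⟩
  have hMmax : ∀ y ∈ a, y ≤ M := fun y hy => PySem.List.max?_isMax hmax y hy
  rw [hget, hmax]
  dsimp only
  by_cases htM : t = M
  · -- a[i] == max(a): A returns -1; B's loop finds nothing above t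
    rw [if_pos htM]
    have : a.foldl (bStep t) none = none :=
      bStep_none_of_not_gt a (fun x hx => by have := hMmax x hx; omega) none
    rw [this]
  · rw [if_neg htM]
    -- there is an element above t, so B's fold is some minimum m
    have hex : ∃ x ∈ a, t < x := ⟨M, PySem.List.max?_mem hmax, by have := hMmax t hta; omega⟩
    obtain ⟨m, hfold⟩ : ∃ m, a.foldl (bStep t) none = some m := by
      have := bStep_isSome a none (Or.inr hex)
      cases hf : a.foldl (bStep t) none with
      | none => rw [hf] at this; simp at this
      | some m => exact ⟨m, rfl⟩
    obtain ⟨h1, h2, h3, _⟩ := bStep_min a none (by simp) m hfold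
    have hma : m ∈ a := h2.resolve_right (by simp)
    rw [hfold]
    -- A's loop over the sorted list yields the same index
    have hmemiff : ∀ x, x ∈ PySem.List.sorted a (fun x => x) false ↔ x ∈ a := fun x =>
      PySem.List.mem_sorted a (fun x => x) false x
    exact llLoop_go a (PySem.List.sorted a (fun x => x) false) t
      (PySem.List.sorted a (fun x => x) false) 0 (by simp)
      (PySem.List.sorted_pairwise a (fun x => x)) ((hmemiff t).2 hta) m ((hmemiff m).2 hma) h1
      (fun x hx hx' => h3 x ((hmemiff x).1 hx) hx')
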